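-- pv_equiv track=rewrite | github.com/Njeriwhite/Aprori | Apriori.py | build_transactions
-- ===== SOURCE A (Python) =====
-- def build_transactions(uni_tid, trans_id, items):
--     transactions = []
--     for i in uni_tid:
--         temp_list = []
--         for j in range(0, len(trans_id)):
--             if trans_id[j] == i:
--                 temp_list.append(items[j])
--         transactions.append(temp_list)
--     return(transactions)
-- ===== SOURCE B (Python) =====
-- def build_transactions(uni_tid, trans_id, items):
--     groups = {}
--     for t, x in zip(trans_id, items):
--         groups.setdefault(t, []).append(x)
--     return [groups.get(i, []) for i in uni_tid]
-- ===== Notes on version B (the rewrite author's own statement) =====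
-- stated objective: faster
-- what changed: Replaced A's rescan of all of trans_id for each unique id by a single grouping pass over zip(trans_id, items) into a dict, then one lookup per unique id.
import Mathlib
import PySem

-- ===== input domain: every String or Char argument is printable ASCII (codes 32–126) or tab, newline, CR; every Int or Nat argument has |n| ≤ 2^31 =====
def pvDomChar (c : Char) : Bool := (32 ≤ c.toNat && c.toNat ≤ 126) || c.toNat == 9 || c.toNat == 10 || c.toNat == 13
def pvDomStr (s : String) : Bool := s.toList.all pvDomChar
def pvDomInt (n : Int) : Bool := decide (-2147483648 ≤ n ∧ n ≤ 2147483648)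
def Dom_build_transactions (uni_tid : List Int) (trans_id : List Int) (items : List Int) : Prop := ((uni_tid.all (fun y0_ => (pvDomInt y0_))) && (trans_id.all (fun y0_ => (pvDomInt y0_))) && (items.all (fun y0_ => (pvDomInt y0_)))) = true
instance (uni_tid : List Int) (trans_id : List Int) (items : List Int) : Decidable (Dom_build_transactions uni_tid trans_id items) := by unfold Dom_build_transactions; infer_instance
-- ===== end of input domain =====

-- B replaces A's rescan of trans_id per unique id by one grouping pass over zip(trans_id, items) into a dict (O(N+U) vs O(U*N)).

-- ===== PORT A =====
-- inner loop: for j in range(0, len(trans_id)): if trans_id[j] == i: temp_list.append(items[j])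
-- (pyGetD's default is only reachable outside Pre_, which excludes exactly A's IndexError inputs)
def bt_inner (trans_id : List Int) (items : List Int) (i : Int) : List Int :=
  (PySem.List.pyRange 0 trans_id.length 1).foldl
    (fun temp_list j =>
      if PySem.List.pyGetD trans_id j 0 == i then temp_list ++ [PySem.List.pyGetD items j 0]
      else temp_list) []

def build_transactions (uni_tid : List Int) (trans_id : List Int) (items : List Int) : List (List Int) :=
  uni_tid.foldl (fun transactions i => transactions ++ [bt_inner trans_id items i]) []

-- ===== PORT B =====
def build_transactions_alt (uni_tid : List Int) (trans_id : List Int) (items : List Int) : List (List Int) :=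
  let groups := (trans_id.zip items).foldl
    (fun d p => d.modify p.1 [] (fun l => l ++ [p.2])) PySem.Dict.empty
  uni_tid.map (fun i => groups.getD i [])

-- ===== PRECONDITION & SPEC =====
-- Pre_ excludes exactly the inputs where A raises IndexError: a position j ≥ len(items) with trans_id[j] in uni_tid.
def Pre_build_transactions (uni_tid : List Int) (trans_id : List Int) (items : List Int) : Prop :=
  ∀ x ∈ trans_id.drop items.length, x ∉ uni_tid
instance (uni_tid : List Int) (trans_id : List Int) (items : List Int) : Decidable (Pre_build_transactions uni_tid trans_id items) := by unfold Pre_build_transactions; infer_instance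

def pvWitness_build_transactions : List Int × List Int × List Int := ([1, 2], [1, 2, 1, 3], [10, 20, 30, 40])

def Spec_build_transactions (uni_tid : List Int) (trans_id : List Int) (items : List Int) (out : List (List Int)) : Prop := out = build_transactions_alt uni_tid trans_id items
instance (uni_tid : List Int) (trans_id : List Int) (items : List Int) (out : List (List Int)) : Decidable (Spec_build_transactions uni_tid trans_id items out) := by unfold Spec_build_transactions; infer_instance

-- ===== CLAIM (what is proved, stated in full; the proofs are below) =====
def Claim_equal_build_transactions : Prop := ∀ (uni_tid : List Int) (trans_id : List Int) (items : List Int), Dom_build_transactions uni_tid trans_id items → Pre_build_transactions uni_tid trans_id items → Spec_build_transactions uni_tid trans_id items (build_transactions uni_tid trans_id items)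

-- ===== LEMMAS AND PROOFS =====

-- A's inner scan over indices equals the zip-filter grouping, when no matching index is out of items' range.
lemma range_filter_map_eq_zip (trans_id items : List Int) (i : Int)
    (h : ∀ x ∈ trans_id.drop items.length, x ≠ i) :
    ((List.range trans_id.length).filter (fun j => trans_id.getD j 0 == i)).map
        (fun j => items.getD j 0)
      = ((trans_id.zip items).filter (fun p => p.1 == i)).map (·.2) := by
  induction trans_id generalizing items with
  | nil => simp
  | cons a t ih =>
    cases items with
    | nil =>
      simp only [List.length_nil, List.drop_zero] at h
      simp only [List.zip_nil_right, List.filter_nil, List.map_nil]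
      simp only [List.map_eq_nil_iff, List.filter_eq_nil_iff]
      intro j hj
      simp only [List.mem_range, List.length_cons, Nat.lt_succ_iff] at hj
      have hjl : j < (a :: t).length := by simp [Nat.lt_succ_of_le hj]
      have hmem : (a :: t).getD j 0 ∈ a :: t := by
        simp only [List.getD_eq_getElem?_getD, List.getElem?_eq_getElem hjl, Option.getD_some]
        exact List.getElem_mem hjl
      simpa using h _ hmem
    | cons b it =>
      have h' : ∀ x ∈ t.drop it.length, x ≠ i := by
        intro x hx; exact h x (by simpa using hx)
      have := ih it h'
      simp only [List.length_cons, List.range_succ_eq_map, List.filter_cons,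
        List.filter_map, List.zip_cons_cons]
      simp only [List.getD_cons_zero]
      by_cases hai : (a == i) = true
      · simp only [hai, if_true, List.map_cons]
        congr 1
        simpa [Function.comp_def] using this
      · simp only [hai, if_false, Bool.false_eq_true]
        simpa [Function.comp_def] using this

lemma inner_eq_getD (trans_id items : List Int) (i : Int)
    (h : ∀ x ∈ trans_id.drop items.length, x ≠ i) :
    bt_inner trans_id items i
      = ((trans_id.zip items).foldl (fun d p => d.modify p.1 [] (fun l => l ++ [p.2]))
          PySem.Dict.empty).getD i [] := by
  unfold bt_inner
  rw [PySem.Dict.getD_foldl_modify_append, PySem.Dict.getD_empty]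
  rw [PySem.List.foldl_append_if]
  simp only [List.nil_append]
  rw [PySem.List.pyRange_zero_nat]
  rw [List.filter_map, List.map_map]
  have := range_filter_map_eq_zip trans_id items i h
  simpa [Function.comp_def] using this

-- ===== VERDICT (by name: the statement is the Claim_ definition above) =====
theorem build_transactions_spec : Claim_equal_build_transactions := by
  intro uni_tid trans_id items _ hpre
  unfold Spec_build_transactions build_transactions build_transactions_alt
  rw [PySem.List.foldl_append_singleton_eq_map, List.nil_append]
  exact List.map_congr_left (fun i hi =>
    inner_eq_getD trans_id items i (fun x hx hxi => hpre x hx (hxi ▸ hi)))
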